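-- pv_equiv track=rewrite | github.com/bhushanasati25/TUF-DSA-Course | Python/Practice Problems.py | print_in_words
-- ===== SOURCE A (Python) =====
-- def print_in_words(n):
--     words = ["zero", "one", "two", "three", "four",
--              "five", "six", "seven", "eight", "nine"]
--
--     # Handle negative numbers
--     if n < 0:
--         return "minus " + print_in_words(-n)
--
--     # Base case: single digit
--     if n < 10:
--         return words[n]
--
--     # Recursive case: process all digits except last, then last
--     return print_in_words(n // 10) + " " + words[n % 10]
-- ===== SOURCE B (Python) =====
-- def print_in_words(n):
--     words = ["zero", "one", "two", "three", "four",
--              "five", "six", "seven", "eight", "nine"]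
--     parts = []
--     m = -n if n < 0 else n
--     while m >= 10:
--         parts.append(words[m % 10])
--         m //= 10
--     parts.append(words[m])
--     if n < 0:
--         parts.append("minus")
--     parts.reverse()
--     return " ".join(parts)
-- ===== Notes on version B (the rewrite author's own statement) =====
-- stated objective: alternative
-- what changed: Replaces the recursion on the quotient by ten (building the string front-to-back by concatenation) with an explicit while loop that collects digit words back-to-front into a list, appends 'minus' for negative n, reverses the list once and does a single join.
import Mathlib
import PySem

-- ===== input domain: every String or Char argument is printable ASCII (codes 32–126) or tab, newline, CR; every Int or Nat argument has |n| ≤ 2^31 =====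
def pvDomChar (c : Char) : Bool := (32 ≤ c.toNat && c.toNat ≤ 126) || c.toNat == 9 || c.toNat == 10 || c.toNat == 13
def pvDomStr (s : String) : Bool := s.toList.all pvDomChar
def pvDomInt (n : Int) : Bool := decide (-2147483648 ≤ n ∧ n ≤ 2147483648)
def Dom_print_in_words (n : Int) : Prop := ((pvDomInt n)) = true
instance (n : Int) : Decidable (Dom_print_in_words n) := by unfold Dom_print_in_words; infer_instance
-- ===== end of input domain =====

-- B replaces A's recursion with an explicit while loop that pushes the
-- digit words back-to-front onto a list, then one reverse and one join (objective: alternative).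

-- ===== PORT A =====
-- words table of A
def pw_words : List String :=
  ["zero", "one", "two", "three", "four", "five", "six", "seven", "eight", "nine"]

-- the nonnegative part of A's recursion: Python's n // 10 and n % 10 on a
-- nonnegative int are exactly Nat division/remainder, so the recursion is on Nat
def pw_printPos (n : Nat) : String :=
  if n < 10 then
    pw_words.getD n ""   -- words[n]; index always in range here (0 ≤ n < 10)
  else
    pw_printPos (n / 10) ++ " " ++ pw_words.getD (n % 10) ""  -- words[n % 10], in range
termination_by n
decreasing_by exact Nat.div_lt_self (by omega) (by omega)

def print_in_words (n : Int) : String :=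
  if n < 0 then "minus " ++ pw_printPos (-n).toNat  -- print_in_words(-n) takes the nonnegative path
  else pw_printPos n.toNat

-- ===== PORT B =====
-- words table of B
def pwb_words : List String :=
  ["zero", "one", "two", "three", "four", "five", "six", "seven", "eight", "nine"]

-- the while loop: 'while m >= 10: parts.append(words[m % 10]); m //= 10' then the
-- final 'parts.append(words[m])'; m stays nonnegative throughout, so it is a Nat
def pwb_loop (m : Nat) (parts : List String) : List String :=
  if 10 ≤ m then pwb_loop (m / 10) (parts ++ [pwb_words.getD (m % 10) ""])
  else parts ++ [pwb_words.getD m ""]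
termination_by m
decreasing_by exact Nat.div_lt_self (by omega) (by omega)

def print_in_words_alt (n : Int) : String :=
  let m : Nat := if n < 0 then (-n).toNat else n.toNat
  let parts := pwb_loop m []
  let parts := if n < 0 then parts ++ ["minus"] else parts
  PySem.Str.join " " parts.reverse

-- ===== PRECONDITION & SPEC =====
def Spec_print_in_words (n : Int) (out : String) : Prop := out = print_in_words_alt n
instance (n : Int) (out : String) : Decidable (Spec_print_in_words n out) := by unfold Spec_print_in_words; infer_instance

-- ===== CLAIM (what is proved, stated in full; the proofs are below) =====
def Claim_equal_print_in_words : Prop := ∀ (n : Int), Dom_print_in_words n → Spec_print_in_words n (print_in_words n)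

-- ===== LEMMAS AND PROOFS =====

-- the digit words of n in left-to-right (printing) order
def pvWlist (n : Nat) : List String :=
  if n < 10 then [pw_words.getD n ""]
  else pvWlist (n / 10) ++ [pw_words.getD (n % 10) ""]
termination_by n
decreasing_by exact Nat.div_lt_self (by omega) (by omega)

lemma pvWlist_ne_nil (n : Nat) : pvWlist n ≠ [] := by
  unfold pvWlist; split <;> simp

lemma pwb_loop_eq (m : Nat) : ∀ parts, pwb_loop m parts = parts ++ (pvWlist m).reverse := by
  induction m using Nat.strong_induction_on with
  | _ m ih =>
    intro parts
    rw [pwb_loop, pvWlist]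
    by_cases h : 10 ≤ m
    · rw [if_pos h, if_neg (by omega), ih (m / 10) (Nat.div_lt_self (by omega) (by omega))]
      simp [pwb_words, pw_words]
    · rw [if_neg h, if_pos (by omega)]
      simp [pwb_words, pw_words]

lemma join_snoc (sep y : List Char) (xs : List (List Char)) (h : xs ≠ []) :
    PySem.Chars.join sep (xs ++ [y]) = PySem.Chars.join sep xs ++ sep ++ y := by
  induction xs with
  | nil => simp at h
  | cons a tl ih =>
    cases tl with
    | nil => simp [PySem.Chars.join_cons_cons, PySem.Chars.join_singleton]
    | cons b tl' =>
      have : a :: b :: tl' ++ [y] = a :: b :: (tl' ++ [y]) := by simp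
      rw [this, PySem.Chars.join_cons_cons, show b :: (tl' ++ [y]) = (b :: tl') ++ [y] by simp,
        ih (by simp), PySem.Chars.join_cons_cons]
      simp

lemma printPos_join (n : Nat) :
    (pw_printPos n).toList = PySem.Chars.join [' '] ((pvWlist n).map String.toList) := by
  induction n using Nat.strong_induction_on with
  | _ n ih =>
    rw [pw_printPos, pvWlist]
    by_cases h : n < 10
    · rw [if_pos h, if_pos h, List.map_singleton, PySem.Chars.join_singleton]
    · rw [if_neg h, if_neg h, List.map_append, List.map_singleton,
        join_snoc _ _ _ (by simp [pvWlist_ne_nil]),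
        ← ih (n / 10) (Nat.div_lt_self (by omega) (by omega))]
      simp [String.toList_append]

lemma join_wlist (m : Nat) : PySem.Str.join " " (pvWlist m) = pw_printPos m := by
  apply String.toList_inj.mp
  rw [PySem.Str.toList_join, printPos_join]
  rfl

-- ===== VERDICT (by name: the statement is the Claim_ definition above) =====
theorem print_in_words_spec : Claim_equal_print_in_words := by
  intro n _
  unfold Spec_print_in_words print_in_words print_in_words_alt
  by_cases h : n < 0
  · simp only [if_pos h, pwb_loop_eq, List.nil_append, List.reverse_append,
      List.reverse_reverse, List.reverse_singleton]
    obtain ⟨w, ws, hw⟩ : ∃ w ws, pvWlist (-n).toNat = w :: ws := by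
      cases hx : pvWlist (-n).toNat with
      | nil => exact absurd hx (pvWlist_ne_nil _)
      | cons a tl => exact ⟨a, tl, rfl⟩
    apply String.toList_inj.mp
    rw [← join_wlist, hw]
    simp only [List.singleton_append, PySem.Str.toList_join, List.map_cons,
      PySem.Chars.join_cons_cons, String.toList_append]
    rfl
  · simp only [if_neg h, pwb_loop_eq, List.nil_append, List.reverse_reverse, join_wlist]
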